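-- pv_equiv track=rewrite | github.com/hanhong-dot/dev | apps/publish/check/maya/asset/check_asis_shader.py | get_pre_name
-- ===== SOURCE A (Python) =====
-- def get_pre_name(name):
--     info = name.split('_')
--     pre_name = ''
--     if len(info) > 1:
--         info.pop(-1)
--         for i in range(len(info)):
--             if i == 0:
--                 pre_name = info[i]
--             else:
--                 pre_name = pre_name + '_' + info[i]
--     else:
--         pre_name = info[0]
--     return pre_name
-- ===== SOURCE B (Python) =====
-- def get_pre_name(name):
--     idx = name.rfind('_')
--     if idx == -1:
--         return name
--     return name[:idx]
-- ===== Notes on version B (the rewrite author's own statement) =====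
-- stated objective: simpler
-- what changed: Replaces split-into-segments, pop, and an index loop that rebuilds the prefix with separator joins by a single rfind of the underscore separator plus one slice.
import Mathlib
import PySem

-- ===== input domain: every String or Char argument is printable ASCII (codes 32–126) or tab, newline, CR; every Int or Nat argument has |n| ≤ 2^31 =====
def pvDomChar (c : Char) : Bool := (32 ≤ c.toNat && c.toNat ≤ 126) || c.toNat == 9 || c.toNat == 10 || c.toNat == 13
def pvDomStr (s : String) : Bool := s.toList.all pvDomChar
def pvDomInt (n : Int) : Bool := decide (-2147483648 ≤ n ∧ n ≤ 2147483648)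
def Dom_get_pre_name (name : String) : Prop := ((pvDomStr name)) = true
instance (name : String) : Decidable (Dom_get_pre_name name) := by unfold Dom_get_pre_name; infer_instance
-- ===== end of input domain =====

-- B replaces A's split-into-segments / pop / index-loop rebuild by rfind('_') plus one slice; objective: simpler.


-- ===== PORT A =====
-- info = name.split('_'); if len > 1: pop last, then rebuild with '_' in an index loop; else info[0]
def get_pre_name (name : String) : String :=
  let info := PySem.Chars.splitOn name.toList ['_']
  if 1 < info.length then
    let info' := info.dropLast
    String.ofList ((PySem.List.pyRange 0 (info'.length : Int) 1).foldl
      (fun pre_name i =>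
        if i == 0 then PySem.List.pyGetD info' i []
        else pre_name ++ ['_'] ++ PySem.List.pyGetD info' i []) [])
  else String.ofList (PySem.List.pyGetD info 0 [])

-- ===== PORT B =====
-- idx = name.rfind('_'); name if idx == -1 else name[:idx]
def get_pre_name_alt (name : String) : String :=
  let idx := PySem.Str.rfind name "_"
  if idx == -1 then name
  else String.ofList (PySem.List.slice name.toList none (some idx))

-- ===== PRECONDITION & SPEC =====
def Spec_get_pre_name (name : String) (out : String) : Prop := out = get_pre_name_alt name
instance (name : String) (out : String) : Decidable (Spec_get_pre_name name out) := by unfold Spec_get_pre_name; infer_instance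

-- ===== CLAIM (what is proved, stated in full; the proofs are below) =====
def Claim_equal_get_pre_name : Prop := ∀ (name : String), Dom_get_pre_name name → Spec_get_pre_name name (get_pre_name name)

-- ===== LEMMAS AND PROOFS =====

-- A clean structural model of splitting on '_'
def mySplit : List Char → List (List Char)
  | [] => [[]]
  | c :: rest => if c = '_' then [] :: mySplit rest else (mySplit rest).modifyHead (c :: ·)

theorem mySplit_ne_nil (l : List Char) : mySplit l ≠ [] := by
  induction l with
  | nil => simp [mySplit]
  | cons c rest ih =>
    simp only [mySplit]
    split
    · simp
    · cases h : mySplit rest with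
      | nil => exact absurd h ih
      | cons a t => simp

theorem splitOn_go_eq (l : List Char) : ∀ (fuel : Nat) (cur : List Char) (acc : List (List Char)),
    l.length ≤ fuel →
    PySem.Chars.splitOn.go ['_'] fuel l cur acc =
      acc.reverse ++ (mySplit l).modifyHead (cur.reverse ++ ·) := by
  induction l with
  | nil =>
    intro fuel cur acc _
    cases fuel with
    | zero => simp [PySem.Chars.splitOn.go, mySplit]
    | succ n => simp [PySem.Chars.splitOn.go, mySplit]
  | cons c rest ih =>
    intro fuel cur acc hf
    cases fuel with
    | zero => simp at hf
    | succ n =>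
      by_cases hc : c = '_'
      · subst hc
        have hpre : List.isPrefixOf ['_'] ('_' :: rest) = true := by
          simp [List.isPrefixOf]
        rw [show PySem.Chars.splitOn.go ['_'] (n+1) ('_' :: rest) cur acc =
              PySem.Chars.splitOn.go ['_'] n (List.drop 1 ('_' :: rest)) [] (cur.reverse :: acc) by
            simp [PySem.Chars.splitOn.go, hpre]]
        simp only [List.drop_succ_cons, List.drop_zero]
        rw [ih n [] (cur.reverse :: acc) (by simpa using Nat.le_of_succ_le_succ hf)]
        cases h : mySplit rest <;> simp [mySplit, h]
      · have hpre : List.isPrefixOf ['_'] (c :: rest) = false := by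
          simp [List.isPrefixOf]
          intro h; exact absurd h.symm hc
        rw [show PySem.Chars.splitOn.go ['_'] (n+1) (c :: rest) cur acc =
              PySem.Chars.splitOn.go ['_'] n rest (c :: cur) acc by
            simp [PySem.Chars.splitOn.go, hpre]]
        rw [ih n (c :: cur) acc (Nat.le_of_succ_le_succ hf)]
        simp only [mySplit, if_neg hc]
        cases h : mySplit rest with
        | nil => exact absurd h (mySplit_ne_nil rest)
        | cons a t => simp

theorem splitOn_eq_mySplit (l : List Char) :
    PySem.Chars.splitOn l ['_'] = mySplit l := by
  have := splitOn_go_eq l (l.length + 1) [] [] (Nat.le_succ _)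
  simp only [PySem.Chars.splitOn] at *
  rw [this]
  cases h : mySplit l with
  | nil => exact absurd h (mySplit_ne_nil l)
  | cons a t => simp

theorem join_mySplit (l : List Char) : PySem.Chars.join ['_'] (mySplit l) = l := by
  induction l with
  | nil => simp [mySplit, PySem.Chars.join_singleton]
  | cons c rest ih =>
    simp only [mySplit]
    by_cases hc : c = '_'
    · subst hc
      rw [if_pos rfl]
      cases h : mySplit rest with
      | nil => exact absurd h (mySplit_ne_nil rest)
      | cons a t =>
        rw [PySem.Chars.join_cons_cons]
        rw [h] at ih
        simp [ih]
    · rw [if_neg hc]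
      cases h : mySplit rest with
      | nil => exact absurd h (mySplit_ne_nil rest)
      | cons a t =>
        cases t with
        | nil =>
          rw [h] at ih
          rw [PySem.Chars.join_singleton] at ih
          simp only [List.modifyHead, PySem.Chars.join_singleton, ih]
        | cons b t' =>
          rw [h] at ih
          simp only [List.modifyHead]
          rw [PySem.Chars.join_cons_cons] at ih ⊢
          simp [ih]

theorem mySplit_len_one_iff (l : List Char) :
    (mySplit l).length = 1 ↔ '_' ∉ l := by
  induction l with
  | nil => simp [mySplit]
  | cons c rest ih =>
    simp only [mySplit]
    by_cases hc : c = '_'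
    · subst hc
      rw [if_pos rfl]
      constructor
      · intro h; simp at h; exact absurd h (mySplit_ne_nil rest)
      · intro h; simp at h
    · rw [if_neg hc]
      cases h : mySplit rest with
      | nil => exact absurd h (mySplit_ne_nil rest)
      | cons a t =>
        rw [h] at ih
        simp only [List.modifyHead, List.length_cons] at ih ⊢
        have hcu : ('_' : Char) ≠ c := fun hh => hc hh.symm
        simp only [List.mem_cons, hcu, false_or]
        constructor
        · intro ht; exact ih.mp (by simp [ht])
        · intro hr; have := ih.mpr hr; simpa [List.length_eq_zero_iff] using this

theorem mySplit_last_no_sep (l : List Char) (x : List Char)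
    (h : (mySplit l).getLast? = some x) : '_' ∉ x := by
  induction l generalizing x with
  | nil =>
    simp [mySplit] at h
    subst h; simp
  | cons c rest ih =>
    by_cases hc : c = '_'
    · subst hc
      rw [show mySplit ('_' :: rest) = [] :: mySplit rest from by simp [mySplit]] at h
      cases hr : mySplit rest with
      | nil => exact absurd hr (mySplit_ne_nil rest)
      | cons a t =>
        rw [hr, List.getLast?_cons_cons] at h
        exact ih x (by rw [hr]; exact h)
    · rw [show mySplit (c :: rest) = (mySplit rest).modifyHead (c :: ·) from by
        simp [mySplit, hc]] at h
      cases hr : mySplit rest with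
      | nil => exact absurd hr (mySplit_ne_nil rest)
      | cons a t =>
        rw [hr, List.modifyHead_cons] at h
        cases t with
        | nil =>
          simp only [List.getLast?_singleton, Option.some.injEq] at h
          subst h
          have ha : '_' ∉ a := ih a (by rw [hr]; rfl)
          have hcu : ('_' : Char) ≠ c := fun hh => hc hh.symm
          simp [List.mem_cons, hcu, ha]
        | cons b t' =>
          rw [List.getLast?_cons_cons] at h
          exact ih x (by rw [hr, List.getLast?_cons_cons]; exact h)

-- rfind characterization for a single-char needle
theorem rfind_go_zero (s : List Char) :
    PySem.Chars.rfind.go s ['_'] 0 =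
      if List.isPrefixOf ['_'] s = true then (0 : Int) else -1 := rfl

theorem rfind_go_succ (s : List Char) (n : Nat) :
    PySem.Chars.rfind.go s ['_'] (n + 1) =
      if List.isPrefixOf ['_'] (s.drop (n + 1)) = true then ((n + 1 : Nat) : Int)
      else PySem.Chars.rfind.go s ['_'] n := rfl

theorem rfind_go_eq_of (s : List Char) (k : Nat)
    (hk : List.isPrefixOf ['_'] (s.drop k) = true) :
    ∀ j, k ≤ j → (∀ i, k < i → i ≤ j → List.isPrefixOf ['_'] (s.drop i) = false) →
    PySem.Chars.rfind.go s ['_'] j = (k : Int) := by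
  intro j
  induction j with
  | zero =>
    intro hkj _
    interval_cases k
    simp only [List.drop_zero] at hk
    rw [rfind_go_zero, if_pos hk]
    norm_num
  | succ n ih =>
    intro hkj hmax
    by_cases hkn : k = n + 1
    · subst hkn
      rw [rfind_go_succ, if_pos hk]
    · have hk_le : k ≤ n := by omega
      have hfalse : List.isPrefixOf ['_'] (s.drop (n + 1)) = false :=
        hmax (n + 1) (by omega) (le_refl _)
      rw [rfind_go_succ, hfalse]
      simp only [Bool.false_eq_true, if_false]
      exact ih hk_le (fun i h1 h2 => hmax i h1 (by omega))

theorem rfind_go_none (s : List Char) :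
    ∀ j, (∀ i, i ≤ j → List.isPrefixOf ['_'] (s.drop i) = false) →
    PySem.Chars.rfind.go s ['_'] j = -1 := by
  intro j
  induction j with
  | zero =>
    intro h
    have h0 := h 0 (le_refl _)
    rw [List.drop_zero] at h0
    rw [rfind_go_zero, h0]
    simp
  | succ n ih =>
    intro h
    rw [rfind_go_succ, h (n+1) (le_refl _)]
    simp only [Bool.false_eq_true, if_false]
    exact ih (fun i hi => h i (by omega))

theorem isPrefixOf_underscore (s : List Char) (i : Nat) :
    List.isPrefixOf ['_'] (s.drop i) = true ↔ s[i]? = some '_' := by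
  cases h : s.drop i with
  | nil =>
    constructor
    · intro hp; simp [List.isPrefixOf] at hp
    · intro hp
      have : i < s.length := (List.getElem?_eq_some_iff.mp hp).1
      have : s.drop i ≠ [] := by simp; omega
      exact absurd h this
  | cons c rest =>
    have hhead : s[i]? = some c := by
      rw [← List.head?_drop, h, List.head?_cons]
    rw [hhead]
    simp only [List.isPrefixOf, Bool.and_true, beq_iff_eq,
      Option.some.injEq]
    exact ⟨fun hh => hh.symm, fun hh => hh.symm⟩

theorem rfind_no_sep (l : List Char) (h : '_' ∉ l) :
    PySem.Chars.rfind l ['_'] = -1 := by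
  unfold PySem.Chars.rfind
  apply rfind_go_none
  intro i _
  cases hp : List.isPrefixOf ['_'] (l.drop i) with
  | false => rfl
  | true =>
    have := (isPrefixOf_underscore l i).mp hp
    exact absurd (List.mem_of_getElem? this) h

theorem rfind_last_sep (pre suf : List Char) (h : '_' ∉ suf) :
    PySem.Chars.rfind (pre ++ '_' :: suf) ['_'] = (pre.length : Int) := by
  unfold PySem.Chars.rfind
  apply rfind_go_eq_of
  · rw [isPrefixOf_underscore]
    simp
  · simp
  · intro i h1 h2
    cases hp : List.isPrefixOf ['_'] ((pre ++ '_' :: suf).drop i) with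
    | false => rfl
    | true =>
      exfalso
      have hget := (isPrefixOf_underscore _ i).mp hp
      have hlen : i < pre.length + (suf.length + 1) := by
        have := (List.getElem?_eq_some_iff.mp hget).1
        simpa using this
      have : ('_' :: suf)[i - pre.length]? = some '_' := by
        rw [List.getElem?_append_right (by omega)] at hget
        exact hget
      have hpos : 0 < i - pre.length := by omega
      rw [List.getElem?_cons, if_neg (by omega)] at this
      exact h (List.mem_of_getElem? this)

-- the A-side fold computes the '_' join
theorem foldl_join_tail (t : List (List Char)) :
    ∀ acc : List Char, t.foldl (fun a e => a ++ ['_'] ++ e) acc = acc ++ t.flatMap ('_' :: ·) := by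
  induction t with
  | nil => intro acc; simp
  | cons x xs ih => intro acc; simp [List.flatMap]

theorem join_eq_flatMap (h : List Char) (t : List (List Char)) :
    PySem.Chars.join ['_'] (h :: t) = h ++ t.flatMap ('_' :: ·) := by
  induction t generalizing h with
  | nil => simp [PySem.Chars.join_singleton]
  | cons x xs ih =>
    rw [PySem.Chars.join_cons_cons, ih x]
    simp

theorem foldA_eq_join (info : List (List Char)) (hne : info ≠ []) :
    (PySem.List.pyRange 0 (info.length : Int) 1).foldl
      (fun pre_name i =>
        if i == 0 then PySem.List.pyGetD info i []
        else pre_name ++ ['_'] ++ PySem.List.pyGetD info i []) [] =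
    PySem.Chars.join ['_'] info := by
  cases info with
  | nil => exact absurd rfl hne
  | cons h t =>
    rw [PySem.List.pyRange_one_cons (by exact_mod_cast Nat.succ_pos t.length)]
    simp only [List.foldl_cons, beq_self_eq_true, if_pos]
    have hfold : (PySem.List.pyRange (0+1) ((h :: t).length : Int) 1).foldl
        (fun pre_name i =>
          if i == 0 then PySem.List.pyGetD (h :: t) i []
          else pre_name ++ ['_'] ++ PySem.List.pyGetD (h :: t) i []) (PySem.List.pyGetD (h :: t) 0 []) =
        (PySem.List.pyRange 1 ((h :: t).length : Int) 1).foldl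
          (fun pre_name i => pre_name ++ ['_'] ++ PySem.List.pyGetD (h :: t) i []) h := by
      rw [PySem.List.pyGetD_zero_cons]
      apply PySem.List.foldl_congr_mem
      intro acc i hi
      have := (PySem.List.mem_pyRange_one).mp hi
      rw [if_neg (by simp; omega)]
    rw [hfold]
    have := PySem.List.foldl_pyRange_pyGetD (h :: t) ([] : List Char)
      (fun a e => a ++ ['_'] ++ e) h (a := 1) (by omega)
    simp only [PySem.List.len_eq] at this ⊢
    rw [this]
    simp only [Int.toNat_one, List.drop_succ_cons, List.drop_zero]
    rw [foldl_join_tail, join_eq_flatMap]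

-- ===== VERDICT (by name: the statement is the Claim_ definition above) =====
theorem get_pre_name_spec : Claim_equal_get_pre_name := by
  intro name _
  unfold Spec_get_pre_name get_pre_name get_pre_name_alt
  simp only [splitOn_eq_mySplit]
  set l := name.toList with hl
  by_cases hmem : '_' ∈ l
  · -- mySplit has ≥ 2 parts; decompose as init ++ [last]
    have hlen1 : (mySplit l).length ≠ 1 := fun h => (mySplit_len_one_iff l).mp h hmem
    have hne := mySplit_ne_nil l
    have hlen : 1 < (mySplit l).length := by
      cases h : (mySplit l).length with
      | zero => exact absurd (List.length_eq_zero_iff.mp h) hne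
      | succ n => omega
    rw [if_pos hlen]
    obtain ⟨init, last, hsplit⟩ : ∃ init last, mySplit l = init ++ [last] :=
      ⟨(mySplit l).dropLast, (mySplit l).getLast hne, (List.dropLast_append_getLast hne).symm⟩
    have hinit_ne : init ≠ [] := by
      intro h; rw [h] at hsplit; simp [hsplit] at hlen
    have hlast : '_' ∉ last := by
      apply mySplit_last_no_sep l
      rw [hsplit, List.getLast?_concat]
    -- l = join '_' init ++ '_' :: last
    have hjoin : PySem.Chars.join ['_'] (init ++ [last]) =
        PySem.Chars.join ['_'] init ++ '_' :: last := by
      cases init with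
      | nil => exact absurd rfl hinit_ne
      | cons a t =>
        rw [join_eq_flatMap, show (a :: t) ++ [last] = a :: (t ++ [last]) from rfl,
          join_eq_flatMap]
        simp
    have hldec : l = PySem.Chars.join ['_'] init ++ '_' :: last := by
      conv_lhs => rw [← join_mySplit l]
      rw [hsplit, hjoin]
    have hrfind : PySem.Str.rfind name "_" = ((PySem.Chars.join ['_'] init).length : Int) := by
      rw [PySem.Str.rfind_eq]
      rw [show ("_" : String).toList = ['_'] from rfl, ← hl, hldec]
      exact rfind_last_sep _ _ hlast
    rw [hrfind]
    rw [if_neg (by simp)]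
    rw [hsplit]
    simp only [List.dropLast_concat]
    rw [foldA_eq_join init hinit_ne]
    congr 1
    rw [hldec, PySem.List.slice_to_natCast]
    simp
  · -- no '_': one part, equal to l
    have hlen1 : (mySplit l).length = 1 := (mySplit_len_one_iff l).mpr hmem
    rw [if_neg (by omega)]
    obtain ⟨p, hp⟩ := List.length_eq_one_iff.mp hlen1
    have hpl : p = l := by
      have := join_mySplit l
      rw [hp, PySem.Chars.join_singleton] at this
      exact this
    have hrfind : PySem.Str.rfind name "_" = -1 := by
      rw [PySem.Str.rfind_eq, show ("_" : String).toList = ['_'] from rfl, ← hl]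
      exact rfind_no_sep l hmem
    rw [hrfind, hp]
    simp [PySem.List.pyGetD_zero_cons, hpl, hl]
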